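-- pv_equiv track=rewrite | github.com/robertpezdirc-eng/copy-of-copy-of-omniscient-ai-platform | external/local/C/Users/admin/Downloads/copy-of-copy-of-omniscient-ai-platform/omni_testing_tools.py | _count_duplications
-- ===== SOURCE A (Python) =====
-- def _count_duplications(content: str) -> int:
--     """Count code duplications"""
--     # Simple duplication detection
--     lines = content.split('\n')
--     duplications = 0
--
--     # Look for repeated lines (simplified)
--     line_counts = {}
--     for line in lines:
--         line_clean = line.strip()
--         if len(line_clean) > 10:  # Only consider substantial lines
--             line_counts[line_clean] = line_counts.get(line_clean, 0) + 1
--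
--     # Count lines that appear more than once
--     for count in line_counts.values():
--         if count > 1:
--             duplications += count - 1
--
--     return duplications
-- ===== SOURCE B (Python) =====
-- def _count_duplications(content: str) -> int:
--     """Count code duplications"""
--     # Online detection: a line is a duplication the moment it reappears.
--     duplications = 0
--     seen = set()
--     for line in content.split('\n'):
--         line_clean = line.strip()
--         if len(line_clean) > 10:
--             if line_clean in seen:
--                 duplications += 1
--             else:
--                 seen.add(line_clean)
--     return duplications
-- ===== Notes on version B (the rewrite author's own statement) =====
-- stated objective: simpler
-- what changed: Replaced A's two-phase histogram (count dictionary built in one pass, then a second pass summing count-1 over values) by a single-pass online detector that keeps a seen-set and increments the result each time an already-seen substantial line reappears; no counts are ever represented and there is no second pass.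
import Mathlib
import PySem

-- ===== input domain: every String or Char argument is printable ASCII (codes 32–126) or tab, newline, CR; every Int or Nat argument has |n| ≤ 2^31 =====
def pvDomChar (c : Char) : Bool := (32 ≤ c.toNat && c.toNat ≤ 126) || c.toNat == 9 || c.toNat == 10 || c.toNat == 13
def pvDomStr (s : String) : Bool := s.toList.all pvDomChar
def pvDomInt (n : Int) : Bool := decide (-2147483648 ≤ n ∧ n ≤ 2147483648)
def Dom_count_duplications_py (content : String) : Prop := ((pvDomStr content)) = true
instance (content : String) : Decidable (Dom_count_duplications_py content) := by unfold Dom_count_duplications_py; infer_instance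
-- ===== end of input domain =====

-- B replaces A's two-phase histogram (count dict + second pass over values) by a
-- single-pass online detector with a seen-set that counts a line when it reappears (simpler).


-- ===== PORT A =====
def count_duplications_py (content : String) : Int :=
  let lines := (PySem.Str.split? content "\n").getD []
  let line_counts : PySem.Dict String Int :=
    lines.foldl (fun d line =>
      let line_clean := PySem.Str.strip line
      if PySem.Str.len line_clean > 10 then
        d.insert line_clean (d.getD line_clean 0 + 1)
      else d) PySem.Dict.empty
  line_counts.values.foldl (fun duplications count =>
    if count > 1 then duplications + (count - 1) else duplications) 0

-- ===== PORT B =====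
def count_duplications_py_alt (content : String) : Int :=
  let lines := (PySem.Str.split? content "\n").getD []
  (lines.foldl (fun (st : Int × PySem.Set String) line =>
      let line_clean := PySem.Str.strip line
      if PySem.Str.len line_clean > 10 then
        if st.2.contains line_clean then (st.1 + 1, st.2)
        else (st.1, st.2.add line_clean)
      else st) ((0 : Int), PySem.Set.empty)).1

-- ===== PRECONDITION & SPEC =====
def Spec_count_duplications_py (content : String) (out : Int) : Prop := out = count_duplications_py_alt content
instance (content : String) (out : Int) : Decidable (Spec_count_duplications_py content out) := by unfold Spec_count_duplications_py; infer_instance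

-- ===== CLAIM (what is proved, stated in full; the proofs are below) =====
def Claim_equal_count_duplications_py : Prop := ∀ (content : String), Dom_count_duplications_py content → Spec_count_duplications_py content (count_duplications_py content)

-- ===== LEMMAS AND PROOFS =====

-- The cleaned substantial lines, in order.
def pvFilt (l : List String) : List String :=
  l.filterMap (fun line =>
    if PySem.Str.len (PySem.Str.strip line) > 10 then some (PySem.Str.strip line) else none)

-- Both loops process only the cleaned substantial lines: a guarded fold over the raw
-- lines is the same fold over pvFilt.
set_option maxHeartbeats 1600000 in
theorem foldl_guard_filterMap {σ : Type} (l : List String) (st : σ) (f : σ → String → σ) :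
    l.foldl (fun st line =>
      if PySem.Str.len (PySem.Str.strip line) > 10 then f st (PySem.Str.strip line) else st) st
    = (pvFilt l).foldl f st := by
  induction l generalizing st with
  | nil => rfl
  | cons x xs ih =>
    simp only [List.foldl_cons, pvFilt, List.filterMap_cons]
    by_cases h : PySem.Str.len (PySem.Str.strip x) > 10
    · simp only [h, if_true]
      rw [ih, pvFilt, List.foldl_cons]
    · simp only [h, if_false]
      rw [ih, pvFilt]

-- A's counting loop, specialised.
set_option maxHeartbeats 1600000 in
theorem a_loop_eq (l : List String) (d0 : PySem.Dict String Int) :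
    l.foldl (fun d line =>
      if PySem.Str.len (PySem.Str.strip line) > 10 then
        d.insert (PySem.Str.strip line) (d.getD (PySem.Str.strip line) 0 + 1)
      else d) d0
    = (pvFilt l).foldl (fun d c => d.insert c (d.getD c 0 + 1)) d0 :=
  foldl_guard_filterMap l d0 (fun d c => d.insert c (d.getD c 0 + 1))

-- B's online loop, specialised.
set_option maxHeartbeats 1600000 in
theorem b_loop_eq (l : List String) (st0 : Int × PySem.Set String) :
    l.foldl (fun (st : Int × PySem.Set String) line =>
      if PySem.Str.len (PySem.Str.strip line) > 10 then
        if st.2.contains (PySem.Str.strip line) then (st.1 + 1, st.2)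
        else (st.1, st.2.add (PySem.Str.strip line))
      else st) st0
    = (pvFilt l).foldl (fun (st : Int × PySem.Set String) c =>
        if st.2.contains c then (st.1 + 1, st.2) else (st.1, st.2.add c)) st0 :=
  foldl_guard_filterMap l st0
    (fun (st : Int × PySem.Set String) c =>
      if st.2.contains c then (st.1 + 1, st.2) else (st.1, st.2.add c))

theorem cast_sum_map (l : List String) (f : String → Nat) :
    (l.map (fun k => ((f k : Int)))).sum = (((l.map f).sum : Nat) : Int) := by
  induction l with
  | nil => simp
  | cons a t ih => simp only [List.map_cons, List.sum_cons, ih]; push_cast; ring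

theorem sum_count_ofList (s : List String) :
    ((PySem.Set.ofList s).map (fun k => (s.count k : Int))).sum = (s.length : Int) := by
  have hperm : (PySem.Set.ofList s).Perm s.dedup := by
    apply List.perm_of_nodup_nodup_toFinset_eq (PySem.Set.nodup_ofList s) s.nodup_dedup
    apply Finset.ext
    intro a
    simp [List.mem_toFinset, PySem.Set.mem_ofList, List.mem_dedup]
  have h1 : ((PySem.Set.ofList s).map (fun k => s.count k)).sum
      = (s.dedup.map (fun k => s.count k)).sum :=
    (hperm.map _).sum_eq
  rw [cast_sum_map, h1, List.sum_map_count_dedup_eq_length s]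

theorem map_sub_one_sum (l : List Int) :
    (l.map (fun c => c - 1)).sum = l.sum - l.length := by
  induction l with
  | nil => simp
  | cons a t ih => simp only [List.map_cons, List.sum_cons, ih, List.length_cons]; push_cast; ring

-- A's second pass over the counter's values, as a sum.
theorem foldl_dup_eq (vs : List Int) (a : Int) (h : ∀ v ∈ vs, 1 ≤ v) :
    vs.foldl (fun acc c => if c > 1 then acc + (c - 1) else acc) a
      = a + (vs.map (fun c => c - 1)).sum := by
  induction vs generalizing a with
  | nil => simp
  | cons v t ih =>
    have hv : 1 ≤ v := h v (List.mem_cons_self)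
    have ht : ∀ x ∈ t, 1 ≤ x := fun x hx => h x (List.mem_cons_of_mem _ hx)
    simp only [List.foldl_cons, List.map_cons, List.sum_cons]
    by_cases hgt : v > 1
    · rw [if_pos hgt, ih _ ht]; ring
    · have hv1 : v = 1 := le_antisymm (not_lt.mp hgt) hv
      rw [if_neg hgt, ih _ ht, hv1]; ring

-- A's whole computation on the filtered line list: total minus distinct.
theorem a_core_eq (s : List String) :
    ((PySem.Dict.counter s).values).foldl
        (fun acc c => if c > 1 then acc + (c - 1) else acc) 0
      = (s.length : Int) - (PySem.Set.ofList s).length := by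
  have hvals : (PySem.Dict.counter s).values
      = (PySem.Set.ofList s).map (fun k => (s.count k : Int)) := by
    show ((PySem.Dict.counter s).items.map (·.2)) = _
    rw [PySem.Dict.items_counter, List.map_map]
    rfl
  rw [hvals]
  have hge : ∀ v ∈ (PySem.Set.ofList s).map (fun k => (s.count k : Int)), 1 ≤ v := by
    intro v hv
    rcases List.mem_map.mp hv with ⟨k, hk, rfl⟩
    have hks : k ∈ s := (PySem.Set.mem_ofList s k).mp hk
    have : 1 ≤ s.count k := List.one_le_count_iff.mpr hks
    exact_mod_cast this
  rw [foldl_dup_eq _ _ hge, map_sub_one_sum, sum_count_ofList]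
  simp

-- B's online loop invariant: the counter advances by (lines seen) − (new distinct lines).
theorem b_inv (s : List String) (seen : PySem.Set String) (d : Int) :
    (s.foldl (fun (st : Int × PySem.Set String) c =>
        if st.2.contains c then (st.1 + 1, st.2) else (st.1, st.2.add c)) (d, seen)).1
      = d + (s.length : Int) + (seen.length : Int)
          - ((PySem.Set.update seen s).length : Int) := by
  induction s generalizing seen d with
  | nil =>
    have hup : PySem.Set.update seen [] = seen := rfl
    simp only [List.foldl_nil, List.length_nil, hup]
    omega
  | cons c xs ih =>
    simp only [List.foldl_cons, List.length_cons]
    rw [PySem.Set.update_cons]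
    by_cases h : seen.contains c = true
    · have hadd : seen.add c = seen := by
        simp only [PySem.Set.add, h, if_true]
      rw [if_pos h, ih, hadd]
      omega
    · have hadd : seen.add c = seen ++ [c] := by
        simp only [PySem.Set.add]
        rw [if_neg h]
      rw [if_neg h, ih, hadd]
      simp only [List.length_append, List.length_cons, List.length_nil]
      omega

-- ===== VERDICT (by name: the statement is the Claim_ definition above) =====
set_option maxHeartbeats 1600000 in
theorem count_duplications_py_spec : Claim_equal_count_duplications_py := by
  intro content _
  show count_duplications_py content = count_duplications_py_alt content
  simp only [count_duplications_py, count_duplications_py_alt]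
  rw [a_loop_eq, b_loop_eq]
  rw [PySem.Dict.foldl_insert_getD_add_one_eq_counter]
  rw [a_core_eq, b_inv]
  have hup : PySem.Set.update PySem.Set.empty (pvFilt ((PySem.Str.split? content "\n").getD []))
      = PySem.Set.ofList (pvFilt ((PySem.Str.split? content "\n").getD [])) := rfl
  rw [hup]
  simp [PySem.Set.empty]
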